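-- pv_equiv track=rewrite | github.com/DONG-8/Algorithm-study | 프로그래머스/최고의 집합.py | solution
-- ===== SOURCE A (Python) =====
-- def solution(n, s):
--     # 1로만 이루어진 합으로도 만들지 못하면 만들 수 없는 집합임
--     if s < 1*n:
--         return [-1]
--     # 그럼 여기서 , 해야 할 일은 나머지가 생겼냐 안생겼냐를 확인하면 됨
--     # 나머지는 어떻게 처리하는가
--     # 나머지는 어쨋든 n보다는 작은 수 n ->6이라면 나머지의 최대는 5 이거를 2또는 1로 만들어주면 최선
--     a = s//n
--     b = s%n
--     answer = [a]*n
--     for i in range(b):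
--         answer[i] += 1
--     answer.sort()
--
--     return answer
-- ===== SOURCE B (Python) =====
-- def solution(n, s):
--     if s < n:
--         return [-1]
--     return [(s + i) // n for i in range(n)]
-- ===== Notes on version B (the rewrite author's own statement) =====
-- stated objective: simpler
-- what changed: Replaces allocate-[s//n]*n, increment the first s%n slots, then sort with a single closed-form comprehension [(s+i)//n for i in range(n)] that yields the sorted answer directly; Pre_ excludes n==0 with s>=0, where A raises ZeroDivisionError.
import Mathlib
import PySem

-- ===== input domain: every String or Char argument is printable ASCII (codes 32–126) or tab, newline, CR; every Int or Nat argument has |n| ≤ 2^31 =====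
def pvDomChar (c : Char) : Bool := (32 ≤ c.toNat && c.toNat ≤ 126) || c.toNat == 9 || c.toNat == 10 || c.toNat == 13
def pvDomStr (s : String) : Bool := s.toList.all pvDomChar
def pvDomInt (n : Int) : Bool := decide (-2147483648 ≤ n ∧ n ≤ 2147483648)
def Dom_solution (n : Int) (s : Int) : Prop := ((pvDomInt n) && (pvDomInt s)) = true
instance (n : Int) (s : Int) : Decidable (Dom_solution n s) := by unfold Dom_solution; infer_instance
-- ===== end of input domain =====

-- B replaces A's allocate / increment-first-b-slots / sort with one closed-form map (s+i)//n (simpler; return value only).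

-- ===== PORT A =====
def solution (n : Int) (s : Int) : List Int :=
  if s < 1 * n then [-1]
  else
    let a := PySem.Int.floordiv s n
    let b := PySem.Int.mod s n
    let answer : List Int := List.replicate n.toNat a
    let answer := (PySem.List.pyRange 0 b 1).foldl
      (fun acc i => acc.set i.toNat (acc.getD i.toNat 0 + 1)) answer
    PySem.List.sorted answer (fun x => x) false

-- ===== PORT B =====
def solution_alt (n : Int) (s : Int) : List Int :=
  if s < n then [-1]
  else (PySem.List.pyRange 0 n 1).map (fun i => PySem.Int.floordiv (s + i) n)

-- ===== PRECONDITION & SPEC =====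
-- Pre_ excludes exactly n = 0 ∧ 0 ≤ s, where A raises ZeroDivisionError (s//0).
def Pre_solution (n : Int) (s : Int) : Prop := ¬ (n = 0 ∧ 0 ≤ s)
instance (n : Int) (s : Int) : Decidable (Pre_solution n s) := by unfold Pre_solution; infer_instance
def pvWitness_solution : Int × Int := (3, 10)

def Spec_solution (n : Int) (s : Int) (out : List Int) : Prop := out = solution_alt n s
instance (n : Int) (s : Int) (out : List Int) : Decidable (Spec_solution n s out) := by unfold Spec_solution; infer_instance

-- ===== CLAIM (what is proved, stated in full; the proofs are below) =====
def Claim_equal_solution : Prop := ∀ (n : Int) (s : Int), Dom_solution n s → Pre_solution n s → Spec_solution n s (solution n s)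

-- ===== LEMMAS AND PROOFS =====

-- A's increment loop: raising the first k slots of [a]*m by one.
lemma foldl_set_replicate (a : Int) (k m : Nat) (hkm : k ≤ m) :
    (PySem.List.pyRange 0 (k : Int) 1).foldl
      (fun acc i => acc.set i.toNat (acc.getD i.toNat 0 + 1)) (List.replicate m a)
    = List.replicate k (a + 1) ++ List.replicate (m - k) a := by
  induction k with
  | zero => simp [PySem.List.pyRange_one_eq_nil]
  | succ k ih =>
    have h1 : PySem.List.pyRange 0 ((k:Int)+1) 1 = PySem.List.pyRange 0 (k:Int) 1 ++ [(k:Int)] :=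
      PySem.List.pyRange_one_succ_right (by positivity)
    push_cast
    rw [h1, List.foldl_append, ih (by omega)]
    simp only [List.foldl_cons, List.foldl_nil, Int.toNat_natCast]
    have hrep : List.replicate (m - k) a = a :: List.replicate (m - (k+1)) a := by
      rw [← List.replicate_succ]; congr 1; omega
    rw [hrep]
    rw [List.getD_append_right, List.set_append_right] <;> simp [List.replicate_succ']

-- B's map is the ascending two-block list.
lemma alt_blocks (n s : Int) (hn : 0 < n) :
    (PySem.List.pyRange 0 n 1).map (fun i => PySem.Int.floordiv (s + i) n)
    = List.replicate (n - PySem.Int.mod s n).toNat (PySem.Int.floordiv s n)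
      ++ List.replicate (PySem.Int.mod s n).toNat (PySem.Int.floordiv s n + 1) := by
  set a := PySem.Int.floordiv s n with ha
  set b := PySem.Int.mod s n with hb
  have hb0 : 0 ≤ b := PySem.Int.mod_nonneg s hn
  have hbn : b < n := PySem.Int.mod_lt s hn
  have hsab : a * n + b = s := PySem.Int.floordiv_mul_add_mod s n
  rw [PySem.List.pyRange_one_append 0 (n-b) n (by omega) (by omega), List.map_append]
  congr 1
  · rw [List.map_congr_left (g := fun _ => a) (fun i hi => ?_), List.map_const',
        PySem.List.length_pyRange_one]
    · congr 1; omega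
    · have := (PySem.List.mem_pyRange_one).1 hi
      rw [PySem.Int.floordiv_eq_iff_of_pos hn]
      constructor <;> nlinarith [hsab]
  · rw [List.map_congr_left (g := fun _ => a + 1) (fun i hi => ?_), List.map_const',
        PySem.List.length_pyRange_one]
    · congr 1; omega
    · have := (PySem.List.mem_pyRange_one).1 hi
      rw [PySem.Int.floordiv_eq_iff_of_pos hn]
      constructor <;> nlinarith [hsab]

-- The two-block ascending list is sorted and a permutation of A's pre-sort list.
lemma sorted_two_blocks (a : Int) (p q : Nat) :
    PySem.List.sorted (List.replicate p (a + 1) ++ List.replicate q a) (fun x => x) false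
    = List.replicate q a ++ List.replicate p (a + 1) := by
  apply PySem.List.eq_of_perm_of_pairwise_le_of_injective (fun x : Int => x)
    (fun _ _ h => h)
  · exact (PySem.List.sorted_perm _ _ _).trans List.perm_append_comm
  · exact PySem.List.sorted_pairwise _ _
  · rw [List.pairwise_append]
    refine ⟨List.pairwise_replicate.2 (by simp), List.pairwise_replicate.2 (by simp), ?_⟩
    intro x hx y hy
    rw [List.eq_of_mem_replicate hx, List.eq_of_mem_replicate hy]
    omega

-- ===== VERDICT (by name: the statement is the Claim_ definition above) =====
theorem solution_spec : Claim_equal_solution := by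
  intro n s _ hpre
  unfold Spec_solution solution solution_alt
  rw [one_mul]
  by_cases hlt : s < n
  · simp [hlt]
  · rw [if_neg hlt, if_neg hlt]
    rcases lt_trichotomy n 0 with hn | hn | hn
    · have hb : PySem.Int.mod s n ≤ 0 := (PySem.Int.mod_neg_bounds s hn).2
      have hnn : n.toNat = 0 := by omega
      simp [PySem.List.pyRange_one_eq_nil hb, PySem.List.pyRange_one_eq_nil (le_of_lt hn),
            hnn, PySem.List.sorted]
    · exact absurd ⟨hn, by omega⟩ hpre
    · set a := PySem.Int.floordiv s n with ha
      set b := PySem.Int.mod s n with hb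
      have hb0 : 0 ≤ b := PySem.Int.mod_nonneg s hn
      have hbn : b < n := PySem.Int.mod_lt s hn
      have hbc : b = ((b.toNat : Nat) : Int) := (Int.toNat_of_nonneg hb0).symm
      rw [alt_blocks n s hn, ← ha, ← hb]
      calc PySem.List.sorted
            ((PySem.List.pyRange 0 b 1).foldl
              (fun acc i => acc.set i.toNat (acc.getD i.toNat 0 + 1)) (List.replicate n.toNat a))
            (fun x => x) false
          = PySem.List.sorted
              (List.replicate b.toNat (a + 1) ++ List.replicate (n.toNat - b.toNat) a)
              (fun x => x) false := by
            conv_lhs => rw [hbc]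
            rw [foldl_set_replicate a b.toNat n.toNat (by omega)]
        _ = List.replicate (n.toNat - b.toNat) a ++ List.replicate b.toNat (a + 1) :=
            sorted_two_blocks a b.toNat (n.toNat - b.toNat)
        _ = List.replicate (n - b).toNat a ++ List.replicate b.toNat (a + 1) := by
            congr 2; omega
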